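-- pv_equiv track=rewrite | github.com/serenhade00/My__BOJ | 백준/Bronze/25785. Easy－to－Pronounce Words/Easy－to－Pronounce Words.py | solve
-- ===== SOURCE A (Python) =====
-- def solve(word):
--     nouns =["a", "e", 'i', "o", "u"]
--     answer = 1
--
--     check_num = 1 if word[0] in nouns else 0
--
--     for w in word[1:]:
--         if w in nouns:
--             check_num += 1
--         else:
--             check_num -= 1
--
--         if check_num > 1 or check_num < 0:
--             answer = 0
--             break
--
--     return answer
-- ===== SOURCE B (Python) =====
-- def solve(word):
--     flags = [c in "aeiou" for c in word]
--     return 1 if all(x != y for x, y in zip(flags, flags[1:])) else 0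
-- ===== Notes on version B (the rewrite author's own statement) =====
-- stated objective: alternative
-- what changed: Replaces A's toggling vowel-counter with early break by a precomputed per-character vowel-flag list checked for adjacent-pair differences via zip; Pre_ excludes the empty word, on which A raises IndexError at word[0].
import Mathlib
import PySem

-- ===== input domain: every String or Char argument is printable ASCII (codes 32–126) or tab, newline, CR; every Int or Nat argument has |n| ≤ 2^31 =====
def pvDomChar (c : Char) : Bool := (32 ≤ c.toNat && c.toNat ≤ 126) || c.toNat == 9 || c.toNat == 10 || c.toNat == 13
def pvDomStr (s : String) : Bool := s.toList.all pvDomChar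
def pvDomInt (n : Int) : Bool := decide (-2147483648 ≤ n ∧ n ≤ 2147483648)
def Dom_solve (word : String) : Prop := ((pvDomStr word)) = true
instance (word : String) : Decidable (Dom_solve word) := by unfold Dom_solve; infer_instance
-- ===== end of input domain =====

-- B checks alternation as adjacent-pair differences over a precomputed vowel-flag list,
-- instead of A's toggling counter with break (objective: alternative decomposition).

-- ===== PORT A =====
-- one loop iteration of A: state = (answer, check_num, broken)
def solveStep (nouns : List Char) (st : Int × Int × Bool) (w : Char) : Int × Int × Bool :=
  if st.2.2 then st
  else
    let check := if nouns.contains w then st.2.1 + 1 else st.2.1 - 1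
    if check > 1 ∨ check < 0 then (0, check, true) else (st.1, check, false)

def solve (word : String) : Int :=
  let nouns : List Char := ['a', 'e', 'i', 'o', 'u']
  match PySem.Str.pyGet? word 0 with
  | none => 0  -- word[0] is an IndexError on the empty word; excluded by Pre_solve
  | some c0 =>
    let check0 : Int := if nouns.contains c0 then 1 else 0
    ((PySem.Str.slice word (some 1) none).toList.foldl (solveStep nouns) (1, check0, false)).1

-- ===== PORT B =====
-- Source B's `all(x != y for x, y in zip(xs, ys))` over the LAZY zip, as one short-circuit
-- recursion on the two lists (exact: Python stops at the first equal adjacent pair)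
def solveAllDiff : List Bool → List Bool → Bool
  | x :: xs, y :: ys => if x != y then solveAllDiff xs ys else false
  | _, _ => true

def solve_alt (word : String) : Int :=
  let flags := word.toList.map (fun c => ("aeiou".toList).contains c)
  if solveAllDiff flags flags.tail then 1 else 0

-- ===== PRECONDITION & SPEC =====
-- Pre_ excludes only the empty word, on which A raises IndexError at word[0].
def Pre_solve (word : String) : Prop := word ≠ ""
instance (word : String) : Decidable (Pre_solve word) := by unfold Pre_solve; infer_instance
def pvWitness_solve : String := ("abba")

def Spec_solve (word : String) (out : Int) : Prop := out = solve_alt word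
instance (word : String) (out : Int) : Decidable (Spec_solve word out) := by unfold Spec_solve; infer_instance

-- ===== CLAIM (what is proved, stated in full; the proofs are below) =====
def Claim_equal_solve : Prop := ∀ (word : String), Dom_solve word → Pre_solve word → Spec_solve word (solve word)

-- ===== LEMMAS AND PROOFS =====

def isVowel (c : Char) : Bool := (['a', 'e', 'i', 'o', 'u'] : List Char).contains c

-- `altB b fs` : the flag list `b :: fs` strictly alternates
def altB : Bool → List Bool → Bool
  | _, [] => true
  | b, x :: xs => (b != x) && altB x xs

-- once broken, the fold keeps the state unchanged
theorem foldl_broken (l : List Char) (a c : Int) :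
    l.foldl (solveStep ['a','e','i','o','u']) (a, c, true) = (a, c, true) := by
  induction l with
  | nil => rfl
  | cons x xs ih => simpa [solveStep] using ih

-- loop invariant: starting with check = flag b of the previous char,
-- the answer is 1 iff the flag sequence b :: map isVowel l alternates
theorem foldl_loop (l : List Char) (b : Bool) :
    (l.foldl (solveStep ['a','e','i','o','u']) (1, (if b then 1 else 0 : Int), false)).1
      = if altB b (l.map isVowel) then 1 else 0 := by
  induction l generalizing b with
  | nil => simp [altB]
  | cons x xs ih =>
    have ih1 : (List.foldl (solveStep ['a','e','i','o','u']) (1, (1:Int), false) xs).1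
        = if altB true (xs.map isVowel) then 1 else 0 := by simpa using ih true
    have ih0 : (List.foldl (solveStep ['a','e','i','o','u']) (1, (0:Int), false) xs).1
        = if altB false (xs.map isVowel) then 1 else 0 := by simpa using ih false
    have hcx : (['a','e','i','o','u'] : List Char).contains x = isVowel x := rfl
    rw [List.foldl_cons, List.map_cons]
    cases b <;> cases hx : isVowel x
    · simp only [solveStep, hcx, hx]
      norm_num [foldl_broken, altB, hx]
    · simp only [solveStep, hcx, hx]
      norm_num [ih1, altB, hx]
    · simp only [solveStep, hcx, hx]
      norm_num [ih0, altB, hx]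
    · simp only [solveStep, hcx, hx]
      norm_num [foldl_broken, altB, hx]

-- B's all-adjacent-pairs-differ test equals the alternation predicate
theorem allDiff_tail (b : Bool) (fs : List Bool) :
    solveAllDiff (b :: fs) fs = altB b fs := by
  induction fs generalizing b with
  | nil => rfl
  | cons y ys ih =>
    rw [show solveAllDiff (b :: y :: ys) (y :: ys)
          = if b != y then solveAllDiff (y :: ys) ys else false from rfl,
      ih y, altB]
    cases b <;> cases y <;> rfl

-- ===== VERDICT (by name: the statement is the Claim_ definition above) =====
theorem solve_spec : Claim_equal_solve := by
  intro word _ hpre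
  unfold Spec_solve solve solve_alt
  cases hl : word.toList with
  | nil => exact absurd (by simpa using congrArg String.ofList hl) hpre
  | cons c cs =>
    have hget : PySem.Str.pyGet? word 0 = some c := by simp [hl]
    have hslice : (PySem.Str.slice word (some 1) none).toList = cs := by
      simp [PySem.Str.slice, PySem.List.slice_from_one, hl]
    rw [hget]
    simp only [hslice, List.map_cons, List.tail_cons]
    have hc : ∀ d : Char, (("aeiou".toList).contains d) = isVowel d := fun d => rfl
    simp only [hc]
    rw [allDiff_tail,
      show (['a','e','i','o','u'] : List Char).contains c = isVowel c from rfl,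
      foldl_loop cs (isVowel c)]
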